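-- pv_equiv track=rewrite | github.com/pypi-data/pypi-mirror-379 | packages/logseq2obsidian/logseq2obsidian-0.0.1.tar.gz/logseq2obsidian-0.0.1/src/obsidian_formatter.py | _optimize_formatting
-- ===== SOURCE A (Python) =====
-- def _optimize_formatting(lines: list) -> list:
--     """格式优化：处理空行和标题间距
--
--     1. 合并连续多个空行为单个空行
--     2. 确保标题前有空行（除非是文档开头）
--     3. 清理空行中的空格和缩进
--     """
--     if not lines:
--         return []
--
--     result = []
--     prev_line_was_empty = False
--
--     for i, line in enumerate(lines):
--         # 检查当前行是否为空行（包括只有空格/制表符的行，或只有单个 '-' 的行）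
--         stripped = line.strip()
--         is_empty_line = not stripped or stripped == '-'
--
--         # 检查当前行是否为标题
--         is_heading = stripped.startswith('#') and len(stripped) > 1 and stripped[1] in ' #'
--
--         if is_empty_line:
--             # 如果前一行不是空行，添加一个干净的空行
--             if not prev_line_was_empty:
--                 result.append('')
--                 prev_line_was_empty = True
--             # 如果前一行已经是空行，跳过当前空行（合并连续空行）
--         else:
--             # 非空行处理
--             if is_heading and i > 0 and not prev_line_was_empty:
--                 # 标题前需要空行，但前一行不是空行，添加空行
--                 result.append('')
--
--             result.append(line)
--             prev_line_was_empty = False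
--
--     return result
-- ===== SOURCE B (Python) =====
-- def _is_empty(line):
--     s = line.strip()
--     return not s or s == '-'
--
--
-- def _is_heading(line):
--     s = line.strip()
--     return s.startswith('#') and len(s) > 1 and s[1] in ' #'
--
--
-- def _optimize_formatting(lines: list) -> list:
--     # pass 0: normalise — blank-ish lines (whitespace-only or lone '-') become ''
--     norm = ['' if _is_empty(l) else l for l in lines]
--     # pass 1: collapse each run of '' into a single ''
--     collapsed = []
--     for x in norm:
--         if x == '' and collapsed and collapsed[-1] == '':
--             continue
--         collapsed.append(x)
--     # pass 2: insert '' before a heading whose predecessor in the collapsed list is not ''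
--     out = collapsed[:1]
--     for prev, h in zip(collapsed, collapsed[1:]):
--         if _is_heading(h) and prev != '':
--             out.append('')
--         out.append(h)
--     return out
-- ===== Notes on version B (the rewrite author's own statement) =====
-- stated objective: alternative
-- what changed: Replaces A's single stateful scan (index + prev_line_was_empty flag) by a two-pass pipeline: normalise each line and collapse blank runs, then a second pass that inserts a blank before a heading whose collapsed predecessor is not blank.
import Mathlib
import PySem

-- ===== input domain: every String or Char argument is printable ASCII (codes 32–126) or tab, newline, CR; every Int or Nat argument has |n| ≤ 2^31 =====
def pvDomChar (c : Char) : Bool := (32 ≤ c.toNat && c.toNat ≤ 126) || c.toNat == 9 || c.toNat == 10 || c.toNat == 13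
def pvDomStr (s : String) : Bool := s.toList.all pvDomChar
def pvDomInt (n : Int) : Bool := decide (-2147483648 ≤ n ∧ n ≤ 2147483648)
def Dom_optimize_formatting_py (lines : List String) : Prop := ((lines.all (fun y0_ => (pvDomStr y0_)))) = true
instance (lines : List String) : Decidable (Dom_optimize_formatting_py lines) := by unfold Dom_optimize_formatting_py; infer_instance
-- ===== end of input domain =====

-- B re-implements A's single stateful scan as two passes (map+collapse of blank runs, then
-- heading-spacing over the collapsed list), each a structural recursion; objective: alternative decomposition.


-- ===== PORT A =====
-- the for-loop of A as structural recursion over the same state (i, result, prev_line_was_empty)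
def optimize_formatting_py_go (i : Nat) (result : List String) (prev : Bool) :
    List String → List String
  | [] => result
  | line :: rest =>
    let stripped := PySem.Str.strip line
    let isEmpty := stripped == "" || stripped == "-"
    let isHeading := PySem.Str.startswith stripped "#" && decide (1 < PySem.Str.len stripped) &&
      (PySem.Str.pyGet? stripped 1).any (fun c => c == ' ' || c == '#')   -- stripped[1] in ' #'
    if isEmpty then
      if !prev then optimize_formatting_py_go (i+1) (result ++ [""]) true rest
      else optimize_formatting_py_go (i+1) result true rest
    else
      let result' := if isHeading && decide (0 < i) && !prev then result ++ [""] else result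
      optimize_formatting_py_go (i+1) (result' ++ [line]) false rest

def optimize_formatting_py (lines : List String) : List String :=
  if lines = [] then [] else optimize_formatting_py_go 0 [] false lines

-- ===== PORT B =====
def isEmptyB (line : String) : Bool :=
  let s := PySem.Str.strip line
  s == "" || s == "-"

def isHeadingB (line : String) : Bool :=
  let s := PySem.Str.strip line
  PySem.Str.startswith s "#" && decide (1 < PySem.Str.len s) &&
    (PySem.Str.pyGet? s 1).any (fun c => c == ' ' || c == '#')

def optimize_formatting_py_alt (lines : List String) : List String :=
  -- pass 0: normalise — blank-ish lines become ""
  let norm := lines.map (fun l => if isEmptyB l then "" else l)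
  -- pass 1: collapse each run of "" into a single ""
  let collapsed := norm.foldl
    (fun acc x =>
      if x == "" && (!(acc == []) && (PySem.List.pyGet? acc (-1) == some "")) then acc
      else acc ++ [x]) []
  -- pass 2: insert "" before a heading whose predecessor in the collapsed list is not ""
  (collapsed.take 1) ++ (collapsed.zip collapsed.tail).foldl
    (fun out ph =>
      (if isHeadingB ph.2 && ph.1 != "" then out ++ [""] else out) ++ [ph.2]) []

-- ===== PRECONDITION & SPEC =====
def Spec_optimize_formatting_py (lines : List String) (out : List String) : Prop := out = optimize_formatting_py_alt lines
instance (lines : List String) (out : List String) : Decidable (Spec_optimize_formatting_py lines out) := by unfold Spec_optimize_formatting_py; infer_instance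

-- ===== CLAIM (what is proved, stated in full; the proofs are below) =====
def Claim_equal_optimize_formatting_py : Prop := ∀ (lines : List String), Dom_optimize_formatting_py lines → Spec_optimize_formatting_py lines (optimize_formatting_py lines)

-- ===== LEMMAS AND PROOFS =====

-- common recursive specification: first = "at original index 0", prev = "last emitted line is ''"
def goSpec (first prev : Bool) : List String → List String
  | [] => []
  | l :: rest =>
    if isEmptyB l then
      if prev then goSpec false true rest else "" :: goSpec false true rest
    else
      (if isHeadingB l && !first && !prev then [""] else []) ++ l :: goSpec false false rest

lemma a_go_spec (lines : List String) : ∀ (i : Nat) (res : List String) (prev : Bool),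
    optimize_formatting_py_go i res prev lines = res ++ goSpec (decide (i = 0)) prev lines := by
  induction lines with
  | nil => intro i res prev; simp [optimize_formatting_py_go, goSpec]
  | cons l rest ih =>
    intro i res prev
    simp only [optimize_formatting_py_go, goSpec, isEmptyB, isHeadingB]
    have hi : decide (0 < i) = !decide (i = 0) := by
      cases i <;> simp
    rw [hi]
    split_ifs with h1 h2 h3 <;>
      simp_all [List.append_assoc]

lemma emptyB_empty : isEmptyB "" = true := by decide

lemma headingB_empty : isHeadingB "" = false := by decide

-- pass-1 / pass-2 of B as structural recursions (proof-side characterisations of B's folds)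
def collapseB : List String → List String
  | [] => []
  | [a] => [a]
  | a :: b :: rest => if a == "" && b == "" then collapseB (b :: rest)
                      else a :: collapseB (b :: rest)

-- collapsed suffix given the previous collapsed element
def collapse2 (prev : String) : List String → List String
  | [] => []
  | x :: r => if prev == "" && x == "" then collapse2 prev r else x :: collapse2 x r

lemma collapseB_cons : ∀ (r : List String) (x : String),
    collapseB (x :: r) = x :: collapse2 x r := by
  intro r
  induction r with
  | nil => intro x; simp [collapseB, collapse2]
  | cons b rest ih =>
    intro x
    simp only [collapseB, collapse2, ih]
    by_cases hx : x = "" <;> by_cases hb : b = "" <;> simp [hx, hb]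

def spaceRestB (prev : String) : List String → List String
  | [] => []
  | h :: rest => (if isHeadingB h && prev != "" then [""] else []) ++ h :: spaceRestB h rest

def spaceB : List String → List String
  | [] => []
  | h :: rest => h :: spaceRestB h rest

-- pass-1 fold with "last kept element is empty" state
def crec (pe : Bool) : List String → List String
  | [] => []
  | x :: r => if x == "" && pe then crec pe r else x :: crec (x == "") r

lemma crec_foldl : ∀ (norm acc : List String),
    norm.foldl (fun acc x =>
        if x == "" && (!(acc == []) && (PySem.List.pyGet? acc (-1) == some "")) then acc
        else acc ++ [x]) acc
      = acc ++ crec (!(acc == []) && (PySem.List.pyGet? acc (-1) == some "")) norm := by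
  intro norm
  induction norm with
  | nil => intro acc; simp [crec]
  | cons x r ih =>
    intro acc
    simp only [List.foldl_cons, crec]
    by_cases hc : (x == "" && (!(acc == []) && (PySem.List.pyGet? acc (-1) == some ""))) = true
    · rw [if_pos hc, if_pos hc, ih acc]
    · rw [if_neg hc, if_neg hc, ih (acc ++ [x])]
      have hpe' : (!((acc ++ [x]) == []) && (PySem.List.pyGet? (acc ++ [x]) (-1) == some "")) = (x == "") := by
        rw [PySem.List.pyGet?_neg_one_append_singleton]
        cases h : (x == "") <;> simp_all
      rw [hpe']
      simp

lemma crec_collapse2 : ∀ (r : List String) (prev : String),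
    crec (prev == "") r = collapse2 prev r := by
  intro r
  induction r with
  | nil => intro prev; rfl
  | cons x t ih =>
    intro prev
    have hxt := ih x
    have h0t : crec true t = collapse2 "" t := by simpa using ih ""
    simp only [crec, collapse2]
    cases hp : (prev == "") <;> cases hxe : (x == "") <;> simp_all

lemma crec_false_collapseB : ∀ (norm : List String), crec false norm = collapseB norm := by
  intro norm
  cases norm with
  | nil => rfl
  | cons x r =>
    rw [collapseB_cons]
    simp [crec, crec_collapse2 r x]

-- pass-2 fold over predecessor/element pairs as recursion
def srec : List (String × String) → List String
  | [] => []
  | ph :: t => (if isHeadingB ph.2 && ph.1 != "" then [""] else []) ++ ph.2 :: srec t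

lemma srec_foldl : ∀ (pairs : List (String × String)) (out : List String),
    pairs.foldl (fun out ph =>
        (if isHeadingB ph.2 && ph.1 != "" then out ++ [""] else out) ++ [ph.2]) out
      = out ++ srec pairs := by
  intro pairs
  induction pairs with
  | nil => intro out; simp [srec]
  | cons ph t ih =>
    intro out
    simp only [List.foldl_cons, srec, ih]
    split_ifs <;> simp [List.append_assoc]

lemma srec_zip : ∀ (r : List String) (x : String),
    srec ((x :: r).zip r) = spaceRestB x r := by
  intro r
  induction r with
  | nil => intro x; rfl
  | cons h t ih => intro x; simp [List.zip_cons_cons, srec, spaceRestB, ih]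

lemma take_zip_spaceB : ∀ (c : List String), c.take 1 ++ srec (c.zip c.tail) = spaceB c := by
  intro c
  cases c with
  | nil => rfl
  | cons h t => simp [spaceB, srec_zip]

-- B's fold pipeline equals the recursive two-pass pipeline
lemma alt_eq (lines : List String) :
    optimize_formatting_py_alt lines
      = spaceB (collapseB (lines.map (fun l => if isEmptyB l then "" else l))) := by
  simp only [optimize_formatting_py_alt]
  rw [crec_foldl, srec_foldl]
  simp only [List.nil_append]
  rw [show (!(([] : List String) == []) && (PySem.List.pyGet? ([] : List String) (-1) == some "")) = false from rfl]
  rw [crec_false_collapseB, take_zip_spaceB]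

lemma b_main (lines : List String) : ∀ (prev : String),
    goSpec false (prev == "") lines
      = spaceRestB prev (collapse2 prev (lines.map (fun l => if isEmptyB l then "" else l))) := by
  induction lines with
  | nil => intro prev; simp [goSpec, collapse2, spaceRestB]
  | cons l rest ih =>
    intro prev
    by_cases he : isEmptyB l = true
    · -- l normalises to ''
      by_cases hp : prev = ""
      · simp [goSpec, he, hp, collapse2, ← ih ""]
      · have hpb : (prev == "") = false := by simp [hp]
        simp [goSpec, he, hpb, collapse2, spaceRestB, headingB_empty, ← ih "", bne]
    · -- l is kept as-is
      have hl : l ≠ "" := by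
        intro h; rw [h] at he; exact he emptyB_empty
      have hlb : (l == "") = false := by simp [hl]
      simp [goSpec, he, collapse2, hlb, spaceRestB, ← ih l, bne, Bool.and_comm]

lemma b_top (lines : List String) : optimize_formatting_py_alt lines = goSpec true false lines := by
  rw [alt_eq]
  cases lines with
  | nil => rfl
  | cons l rest =>
    simp only [List.map_cons]
    by_cases he : isEmptyB l = true
    · rw [he]
      simp only [if_true, collapseB_cons, spaceB, goSpec, he]
      have := b_main rest ""
      simp only [show ("" == "") = true from rfl] at this
      simp [← this]
    · have hl : l ≠ "" := by
        intro h; rw [h] at he; exact he emptyB_empty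
      have hlb : (l == "") = false := by simp [hl]
      simp only [he, if_false, Bool.false_eq_true, collapseB_cons, spaceB, goSpec]
      have := b_main rest l
      rw [hlb] at this
      simp [← this]

lemma a_top (lines : List String) : optimize_formatting_py lines = goSpec true false lines := by
  cases lines with
  | nil => rfl
  | cons l rest =>
    simp only [optimize_formatting_py, if_neg (List.cons_ne_nil l rest)]
    have := a_go_spec (l :: rest) 0 [] false
    simpa using this

-- ===== VERDICT (by name: the statement is the Claim_ definition above) =====
theorem optimize_formatting_py_spec : Claim_equal_optimize_formatting_py := by
  intro lines _
  unfold Spec_optimize_formatting_py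
  rw [a_top, b_top]
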